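-- pv_equiv track=rewrite | github.com/Hoegh07/Project-Euler | Euler759/Euler759.py | Sb2
-- ===== SOURCE A (Python) =====
-- MOD = 1000000007
--
-- memo_Sb = {}
--
-- def Sb(n):
--     if(n in memo_Sb):
--         return memo_Sb[n]
--     if(n == 0):
--         return 0
--     if(n%2 == 0):
--         c = (Sb(n//2)+Sb(n//2-1)+n//2)%MOD
--         memo_Sb[n] = c
--         return c
--     c = (2*Sb(n//2)+n//2+1)%MOD
--     memo_Sb[n] = c
--     return c
--
-- def b(n):
--     y = str(bin(n)[2:])
--     res = 0
--     for i in range(0,len(y)):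
--         if(y[i] == '1'):
--             res += 1
--     return res
--
-- memo_Sb2 = {}
--
-- def Sb2(n):
--     if(n in memo_Sb2):
--         return memo_Sb2[n]
--     if(n == 0):
--         return 0
--     if(n == 1):
--         return 1
--     if(n%2 == 0):
--         c = (1+b(n)**2+2*Sb2(n//2-1)+2*Sb(n//2-1)+n//2-1)%MOD
--         memo_Sb2[n] = c
--         return c
--     c = (1+2*Sb2(n//2)+2*Sb(n//2)+n//2)%MOD
--     memo_Sb2[n] = c
--     return c
-- ===== SOURCE B (Python) =====
-- MOD = 1000000007
--
-- def _sb(m):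
--     # Sb(m) mod MOD by a single left-to-right pass over m's bits,
--     # maintaining the pair (Sb(v), Sb(v-1)) for the bit-prefix value v.
--     if m <= 0:
--         return 0
--     a, b, v = 1, 0, 1   # Sb(1) = 1, Sb(0) = 0
--     for ch in bin(m)[3:]:
--         if ch == '0':
--             a, b, v = (a + b + v) % MOD, (2 * b + v) % MOD, 2 * v
--         else:
--             a, b, v = (2 * a + v + 1) % MOD, (a + b + v) % MOD, 2 * v + 1
--     return a
--
-- def Sb2(n):
--     # walk the single reduction chain down to 0/1, then fold back up
--     stack = []
--     k = n
--     while k > 1: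
--         stack.append(k)
--         k = k // 2 - 1 if k % 2 == 0 else k // 2
--     res = 1 if k == 1 else 0
--     for m in reversed(stack):
--         if m % 2 == 0:
--             res = (1 + bin(m).count('1') ** 2 + 2 * res + 2 * _sb(m // 2 - 1) + m // 2 - 1) % MOD
--         else:
--             res = (1 + 2 * res + 2 * _sb(m // 2) + m // 2) % MOD
--     return res
-- ===== Notes on version B (the rewrite author's own statement) =====
-- stated objective: alternative
-- what changed: Replaces both memoised recursions with iterative evaluation: Sb2 walks the single reduction chain down with an explicit stack and folds the even/odd formula back up, and Sb is computed by a left-to-right pass over the bits maintaining the pair (Sb(v), Sb(v-1)); no memo dicts or recursion.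
import Mathlib
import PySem

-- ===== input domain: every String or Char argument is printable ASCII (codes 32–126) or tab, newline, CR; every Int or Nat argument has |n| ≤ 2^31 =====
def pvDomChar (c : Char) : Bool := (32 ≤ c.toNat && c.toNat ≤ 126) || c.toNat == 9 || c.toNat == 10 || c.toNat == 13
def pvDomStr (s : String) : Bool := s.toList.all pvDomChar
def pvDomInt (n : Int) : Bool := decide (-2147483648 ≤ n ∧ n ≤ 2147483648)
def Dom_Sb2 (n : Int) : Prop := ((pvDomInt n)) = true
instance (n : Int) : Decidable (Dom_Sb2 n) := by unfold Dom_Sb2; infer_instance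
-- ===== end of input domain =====

-- B evaluates the same recurrences iteratively (explicit stack for Sb2, a bit-scan pair
-- iteration for Sb) instead of A's memoised recursion; alternative decomposition, not faster.
-- Equivalence is about the return value; A also mutates its global memo dicts, B keeps no state.

-- ===== PORT A =====

def pvMOD : Int := 1000000007

-- bin(n)[2:] as a char list, built MSB-last; exact for n ≥ 1 (for n = 0 Python gives "0",
-- here []: both contain no '1', and b is only consulted for its count of '1' chars)
def pvBinChars (n : Nat) : List Char :=
  if h : n = 0 then []
  else pvBinChars (n / 2) ++ [if n % 2 = 1 then '1' else '0']
decreasing_by exact Nat.div_lt_self (Nat.pos_of_ne_zero h) (by norm_num)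

-- port of b: loop over the binary string counting '1'
def pvB (n : Nat) : Int :=
  (pvBinChars n).foldl (fun res c => if c = '1' then res + 1 else res) 0

-- port of Sb (memoisation dropped: it only caches the pure recursion's values)
def pvSb (n : Nat) : Int :=
  if h : n = 0 then 0
  else if n % 2 = 0 then (pvSb (n / 2) + pvSb (n / 2 - 1) + ((n / 2 : Nat) : Int)) % pvMOD
  else (2 * pvSb (n / 2) + ((n / 2 : Nat) : Int) + 1) % pvMOD
decreasing_by
  · exact Nat.div_lt_self (Nat.pos_of_ne_zero h) (by norm_num)
  · exact lt_of_le_of_lt (Nat.sub_le _ _) (Nat.div_lt_self (Nat.pos_of_ne_zero h) (by norm_num))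
  · exact Nat.div_lt_self (Nat.pos_of_ne_zero h) (by norm_num)

def pvSb2Nat (n : Nat) : Int :=
  if h0 : n = 0 then 0
  else if h1 : n = 1 then 1
  else if n % 2 = 0 then
    (1 + pvB n ^ 2 + 2 * pvSb2Nat (n / 2 - 1) + 2 * pvSb (n / 2 - 1) + ((n / 2 : Nat) : Int) - 1) % pvMOD
  else (1 + 2 * pvSb2Nat (n / 2) + 2 * pvSb (n / 2) + ((n / 2 : Nat) : Int)) % pvMOD
decreasing_by
  · exact lt_of_le_of_lt (Nat.sub_le _ _) (Nat.div_lt_self (Nat.pos_of_ne_zero h0) (by norm_num))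
  · exact Nat.div_lt_self (Nat.pos_of_ne_zero h0) (by norm_num)

def Sb2 (n : Int) : Int := pvSb2Nat n.toNat

-- ===== PORT B =====

-- binary digits of n, least-significant first (so bin(n)[2:] = (pvBitsRev n).reverse as digits)
def pvBitsRev (n : Nat) : List Nat :=
  if h : n = 0 then []
  else n % 2 :: pvBitsRev (n / 2)
decreasing_by exact Nat.div_lt_self (Nat.pos_of_ne_zero h) (by norm_num)

-- bin(m).count('1')
def pvPop (m : Nat) : Int := ((pvBitsRev m).count 1 : Int)

-- one bit of the left-to-right pair iteration for Sb: state (Sb(v), Sb(v-1), v)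
def pvSbStep (st : Int × Int × Nat) (bit : Nat) : Int × Int × Nat :=
  if bit = 0 then
    ((st.1 + st.2.1 + (st.2.2 : Int)) % pvMOD, (2 * st.2.1 + (st.2.2 : Int)) % pvMOD, 2 * st.2.2)
  else
    ((2 * st.1 + (st.2.2 : Int) + 1) % pvMOD, (st.1 + st.2.1 + (st.2.2 : Int)) % pvMOD, 2 * st.2.2 + 1)

-- _sb of Source B: fold over bin(m)[3:]
def pvSbAlt (m : Nat) : Int :=
  if m = 0 then 0
  else (((pvBitsRev m).reverse.tail).foldl pvSbStep (1, 0, 1)).1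

-- the reduction chain of the while loop (arguments pushed on the stack)
def pvChain (n : Nat) : List Nat :=
  if h : n ≤ 1 then []
  else n :: pvChain (if n % 2 = 0 then n / 2 - 1 else n / 2)
decreasing_by
  all_goals (split <;> omega)

-- the final value k of the while loop
def pvChainEnd (n : Nat) : Nat :=
  if h : n ≤ 1 then n
  else pvChainEnd (if n % 2 = 0 then n / 2 - 1 else n / 2)
decreasing_by
  all_goals (split <;> omega)

-- one upward step of the fold over reversed(stack)
def pvUpStep (res : Int) (m : Nat) : Int :=
  if m % 2 = 0 then
    (1 + pvPop m ^ 2 + 2 * res + 2 * pvSbAlt (m / 2 - 1) + ((m / 2 : Nat) : Int) - 1) % pvMOD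
  else (1 + 2 * res + 2 * pvSbAlt (m / 2) + ((m / 2 : Nat) : Int)) % pvMOD

def pvSb2AltNat (n : Nat) : Int :=
  (pvChain n).reverse.foldl pvUpStep (if pvChainEnd n = 1 then 1 else 0)

def Sb2_alt (n : Int) : Int := pvSb2AltNat n.toNat

-- ===== PRECONDITION & SPEC =====

-- A recurses forever (Python RecursionError) on negative n, so those inputs are excluded.
def Pre_Sb2 (n : Int) : Prop := 0 ≤ n
instance (n : Int) : Decidable (Pre_Sb2 n) := by unfold Pre_Sb2; infer_instance

def pvWitness_Sb2 : Int := (10)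

def Spec_Sb2 (n : Int) (out : Int) : Prop := out = Sb2_alt n
instance (n : Int) (out : Int) : Decidable (Spec_Sb2 n out) := by unfold Spec_Sb2; infer_instance

-- ===== CLAIM (what is proved, stated in full; the proofs are below) =====
def Claim_equal_Sb2 : Prop := ∀ (n : Int), Dom_Sb2 n → Pre_Sb2 n → Spec_Sb2 n (Sb2 n)

-- ===== LEMMAS AND PROOFS =====

theorem pvSb_zero : pvSb 0 = 0 := by rw [pvSb]; norm_num

theorem pvSb_one : pvSb 1 = 1 := by
  rw [pvSb]; norm_num [pvSb_zero, pvMOD]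

theorem foldl_count_ones (l : List Char) (r : Int) :
    l.foldl (fun res c => if c = '1' then res + 1 else res) r = r + (l.count '1' : Int) := by
  induction l generalizing r with
  | nil => simp
  | cons c t ih =>
      simp only [List.foldl_cons, ih, List.count_cons]
      by_cases h : c = '1' <;> simp [h] <;> push_cast <;> ring

theorem binChars_count (n : Nat) :
    (pvBinChars n).count '1' = (pvBitsRev n).count 1 := by
  induction n using Nat.strong_induction_on with
  | _ n ih =>
    by_cases h : n = 0
    · simp [pvBinChars, pvBitsRev, h]
    · rw [pvBinChars, pvBitsRev]
      simp only [h, dite_false]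
      rw [List.count_append, List.count_cons,
        ih (n / 2) (Nat.div_lt_self (Nat.pos_of_ne_zero h) (by norm_num))]
      by_cases h2 : n % 2 = 1 <;> simp [h2] <;> omega

theorem pop_eq (n : Nat) : pvB n = pvPop n := by
  rw [pvB, pvPop, foldl_count_ones, binChars_count]; ring

theorem tail_append_singleton {α : Type} (l : List α) (a : α) (h : l ≠ []) :
    (l ++ [a]).tail = l.tail ++ [a] := by
  cases l with
  | nil => exact absurd rfl h
  | cons x t => simp

theorem bitsRev_zero : pvBitsRev 0 = [] := by
  rw [pvBitsRev]; norm_num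

theorem bitsRev_one : pvBitsRev 1 = [1] := by
  rw [pvBitsRev]; norm_num [bitsRev_zero]

theorem pair_invariant (m : Nat) (h : 1 ≤ m) :
    ((pvBitsRev m).reverse.tail).foldl pvSbStep (1, 0, 1) = (pvSb m, pvSb (m - 1), m) := by
  induction m using Nat.strong_induction_on with
  | _ m ih =>
    by_cases h1 : m = 1
    · subst h1
      simp [bitsRev_one, pvSb_one, pvSb_zero]
    · have hm2 : 2 ≤ m := by omega
      have hd2 : 1 ≤ m / 2 := by omega
      have hlt : m / 2 < m := by omega
      have hne : (pvBitsRev (m / 2)).reverse ≠ [] := by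
        rw [pvBitsRev]
        simp only [show ¬ (m / 2 = 0) by omega, dite_false]
        simp
      rw [pvBitsRev]
      simp only [show ¬ (m = 0) by omega, dite_false, List.reverse_cons]
      rw [tail_append_singleton _ _ hne, List.foldl_append, ih (m / 2) hlt hd2]
      simp only [List.foldl_cons, List.foldl_nil]
      by_cases hp : m % 2 = 0
      · -- even m: step with bit 0 from (Sb(m/2), Sb(m/2-1), m/2)
        rw [pvSbStep]
        simp only [hp, if_true]
        have e1 : pvSb m = (pvSb (m / 2) + pvSb (m / 2 - 1) + ((m / 2 : Nat) : Int)) % pvMOD := by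
          rw [pvSb]; simp [show ¬ (m = 0) by omega, hp]
        have e2 : pvSb (m - 1) = (2 * pvSb (m / 2 - 1) + ((m / 2 : Nat) : Int)) % pvMOD := by
          rw [pvSb]
          have hh : (m - 1) / 2 = m / 2 - 1 := by omega
          simp only [show ¬ (m - 1 = 0) by omega, dite_false,
            show ¬ ((m - 1) % 2 = 0) by omega, if_false, hh]
          have hc : ((m / 2 - 1 : Nat) : Int) = ((m / 2 : Nat) : Int) - 1 := by omega
          rw [hc]; ring_nf
        rw [e1, e2]
        refine Prod.ext rfl (Prod.ext rfl ?_)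
        show 2 * (m / 2) = m
        omega
      · -- odd m: step with bit 1 from (Sb(m/2), Sb(m/2-1), m/2)
        rw [pvSbStep, if_neg hp]
        have e1 : pvSb m = (2 * pvSb (m / 2) + ((m / 2 : Nat) : Int) + 1) % pvMOD := by
          rw [pvSb]; simp [show ¬ (m = 0) by omega, hp]
        have e2 : pvSb (m - 1) = (pvSb (m / 2) + pvSb (m / 2 - 1) + ((m / 2 : Nat) : Int)) % pvMOD := by
          rw [pvSb]
          have hh : (m - 1) / 2 = m / 2 := by omega
          simp only [show ¬ (m - 1 = 0) by omega, dite_false,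
            show (m - 1) % 2 = 0 by omega, if_true, hh]
        rw [e1, e2]
        refine Prod.ext rfl (Prod.ext rfl ?_)
        show 2 * (m / 2) + 1 = m
        omega

theorem sbAlt_eq (m : Nat) : pvSbAlt m = pvSb m := by
  by_cases h : m = 0
  · rw [pvSbAlt, pvSb]; simp [h]
  · rw [pvSbAlt]
    simp only [h, if_false]
    rw [pair_invariant m (by omega)]

theorem sb2_main (n : Nat) : pvSb2AltNat n = pvSb2Nat n := by
  induction n using Nat.strong_induction_on with
  | _ n ih =>
    by_cases h01 : n ≤ 1
    · rw [pvSb2AltNat, pvChain, pvChainEnd]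
      simp only [h01, dite_true, List.reverse_nil, List.foldl_nil]
      interval_cases n
      · rw [pvSb2Nat]; norm_num
      · rw [pvSb2Nat]; norm_num
    · have hlt : (if n % 2 = 0 then n / 2 - 1 else n / 2) < n := by split <;> omega
      rw [pvSb2AltNat, pvChain, pvChainEnd]
      simp only [h01, dite_false, List.reverse_cons, List.foldl_append, List.foldl_cons,
        List.foldl_nil]
      rw [show ((pvChain (if n % 2 = 0 then n / 2 - 1 else n / 2)).reverse.foldl pvUpStep
          (if pvChainEnd (if n % 2 = 0 then n / 2 - 1 else n / 2) = 1 then 1 else 0))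
          = pvSb2AltNat (if n % 2 = 0 then n / 2 - 1 else n / 2) from rfl]
      rw [ih _ hlt]
      by_cases hp : n % 2 = 0
      · simp only [hp, if_true]
        conv_rhs => rw [pvSb2Nat]
        simp only [show ¬ (n = 0) by omega, show ¬ (n = 1) by omega, dite_false, hp, if_true]
        rw [pvUpStep]
        simp [hp, sbAlt_eq, pop_eq]
      · simp only [hp, if_false]
        conv_rhs => rw [pvSb2Nat]
        simp only [show ¬ (n = 0) by omega, show ¬ (n = 1) by omega, dite_false, hp, if_false]
        rw [pvUpStep]
        simp [hp, sbAlt_eq]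

-- ===== VERDICT (by name: the statement is the Claim_ definition above) =====
theorem Sb2_spec : Claim_equal_Sb2 := by
  intro n _ _
  unfold Spec_Sb2 Sb2 Sb2_alt
  rw [sb2_main]
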